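-- pv_equiv track=rewrite | github.com/yassine955/Umrah | flights-scraper/index.py | split_outbound_return
-- ===== SOURCE A (Python) =====
-- def split_outbound_return(legs: list, arrival_id: str):
--     """
--     Heuristiek: alles t/m eerste aankomst op arrival_id = heenweg.
--     Zodra we een leg zien die VERTREKT vanaf arrival_id, beschouwen we het als start van terugweg.
--     Let op: SerpApi levert niet altijd teruglegs mee; dan blijft 'return_legs' leeg.
--     """
--     outbound_legs = []
--     return_legs = []
--     in_return = False
--
--     for leg in legs:
--         dep = leg.get("departure_airport", {}).get("id")
--         arr = leg.get("arrival_airport", {}).get("id")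
--         if dep == arrival_id:
--             in_return = True
--         (return_legs if in_return else outbound_legs).append(leg)
--
--     # fallback: als er nooit een leg vanaf arrival_id startte maar de laatste aankomst is arrival_id,
--     # dan is het waarschijnlijk een one-way dataset.
--     return outbound_legs, return_legs
-- ===== SOURCE B (Python) =====
-- def split_outbound_return(legs: list, arrival_id: str):
--     """Find the first leg departing from arrival_id; everything before it is
--     outbound, everything from it on is the return trip."""
--     i = next(
--         (k for k, leg in enumerate(legs)
--          if leg.get("departure_airport", {}).get("id") == arrival_id),
--         None,
--     )
--     if i is None:
--         return list(legs), []
--     return legs[:i], legs[i:]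
-- ===== Notes on version B (the rewrite author's own statement) =====
-- stated objective: simpler
-- what changed: Replaces A's flag-driven loop that dispatches each leg into one of two accumulator lists with a single search for the first leg departing from arrival_id followed by two list slices.
import Mathlib
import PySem

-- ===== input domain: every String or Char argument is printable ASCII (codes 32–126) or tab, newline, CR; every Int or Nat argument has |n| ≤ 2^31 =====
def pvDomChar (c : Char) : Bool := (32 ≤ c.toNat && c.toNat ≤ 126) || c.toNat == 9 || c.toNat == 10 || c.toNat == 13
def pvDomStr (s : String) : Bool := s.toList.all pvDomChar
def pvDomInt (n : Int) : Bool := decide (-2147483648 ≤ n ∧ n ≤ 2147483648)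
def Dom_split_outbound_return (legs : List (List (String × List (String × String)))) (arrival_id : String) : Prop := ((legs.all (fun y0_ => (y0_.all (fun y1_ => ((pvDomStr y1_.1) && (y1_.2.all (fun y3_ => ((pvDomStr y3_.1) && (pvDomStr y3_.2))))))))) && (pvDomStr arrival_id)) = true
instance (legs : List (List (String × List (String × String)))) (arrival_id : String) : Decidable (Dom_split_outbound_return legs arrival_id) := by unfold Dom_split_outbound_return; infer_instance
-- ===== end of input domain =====

-- B replaces A's flag-driven per-element dispatch loop by a single index search
-- followed by two slices (objective: simpler).

-- dict.get(k) on an association list: first match, none if absent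
def pvLookup {ν : Type} (d : List (String × ν)) (k : String) : Option ν :=
  (d.find? (fun p => p.1 == k)).map (·.2)

-- leg.get("departure_airport", {}).get("id")
def pvDepId (leg : List (String × List (String × String))) : Option String :=
  pvLookup ((pvLookup leg "departure_airport").getD []) "id"

-- leg.get("arrival_airport", {}).get("id")  (computed by A, unused)
def pvArrId (leg : List (String × List (String × String))) : Option String :=
  pvLookup ((pvLookup leg "arrival_airport").getD []) "id"

-- ===== PORT A =====
def pvStepA (arrival_id : String)
    (st : List (List (String × List (String × String))) × List (List (String × List (String × String))) × Bool)
    (leg : List (String × List (String × String))) :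
    List (List (String × List (String × String))) × List (List (String × List (String × String))) × Bool :=
  let dep := pvDepId leg
  let _arr := pvArrId leg
  let in_return := if dep = some arrival_id then true else st.2.2
  if in_return then (st.1, st.2.1 ++ [leg], in_return)
  else (st.1 ++ [leg], st.2.1, in_return)

def split_outbound_return (legs : List (List (String × List (String × String)))) (arrival_id : String) : (List (List (String × List (String × String)))) × (List (List (String × List (String × String)))) :=
  let st := legs.foldl (pvStepA arrival_id) ([], [], false)
  (st.1, st.2.1)

-- ===== PORT B =====
def split_outbound_return_alt (legs : List (List (String × List (String × String)))) (arrival_id : String) : (List (List (String × List (String × String)))) × (List (List (String × List (String × String)))) :=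
  match legs.findIdx? (fun leg => pvDepId leg == some arrival_id) with
  | none => (legs, [])
  | some i => (legs.take i, legs.drop i)

-- ===== PRECONDITION & SPEC =====
def Spec_split_outbound_return (legs : List (List (String × List (String × String)))) (arrival_id : String) (out : (List (List (String × List (String × String)))) × (List (List (String × List (String × String))))) : Prop := out = split_outbound_return_alt legs arrival_id
instance (legs : List (List (String × List (String × String)))) (arrival_id : String) (out : (List (List (String × List (String × String)))) × (List (List (String × List (String × String))))) : Decidable (Spec_split_outbound_return legs arrival_id out) := by unfold Spec_split_outbound_return; exact instDecidableEqProd _ _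

-- ===== CLAIM (what is proved, stated in full; the proofs are below) =====
def Claim_equal_split_outbound_return : Prop := ∀ (legs : List (List (String × List (String × String)))) (arrival_id : String), Dom_split_outbound_return legs arrival_id → Spec_split_outbound_return legs arrival_id (split_outbound_return legs arrival_id)

-- ===== LEMMAS AND PROOFS =====

-- once in_return is true, every remaining leg goes to return_legs
theorem foldl_stepA_true (arrival_id : String)
    (legs : List (List (String × List (String × String))))
    (out ret : List (List (String × List (String × String)))) :
    legs.foldl (pvStepA arrival_id) (out, ret, true) = (out, ret ++ legs, true) := by
  induction legs generalizing ret with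
  | nil => simp
  | cons l ls ih =>
      simp only [List.foldl_cons, pvStepA]
      split <;> simp [ih]

-- while in_return is false, the loop splits at the first leg departing from arrival_id
theorem foldl_stepA_false (arrival_id : String)
    (legs : List (List (String × List (String × String))))
    (out ret : List (List (String × List (String × String)))) :
    legs.foldl (pvStepA arrival_id) (out, ret, false) =
      match legs.findIdx? (fun leg => pvDepId leg == some arrival_id) with
      | none => (out ++ legs, ret, false)
      | some i => (out ++ legs.take i, ret ++ legs.drop i, true) := by
  induction legs generalizing out with
  | nil => simp
  | cons l ls ih =>
      by_cases h : pvDepId l = some arrival_id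
      · simp [pvStepA, h, List.findIdx?_cons, foldl_stepA_true]
      · have hstep : pvStepA arrival_id (out, ret, false) l = (out ++ [l], ret, false) := by
          simp [pvStepA, h]
        rw [List.foldl_cons, hstep, ih, List.findIdx?_cons]
        cases hf : ls.findIdx? (fun leg => pvDepId leg == some arrival_id) with
        | none => simp [h]
        | some i => simp [h]

-- ===== VERDICT (by name: the statement is the Claim_ definition above) =====
theorem split_outbound_return_spec : Claim_equal_split_outbound_return := by
  intro legs arrival_id _
  unfold Spec_split_outbound_return split_outbound_return split_outbound_return_alt
  rw [foldl_stepA_false]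
  cases hf : legs.findIdx? (fun leg => pvDepId leg == some arrival_id) with
  | none => simp
  | some i => simp
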